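-- pv_equiv track=rewrite | github.com/tictactoeid/Algorithm-Problems | Programmers/코딩테스트 고득점 kit/240904 - 87694.py | bfs_reach
-- ===== SOURCE A (Python) =====
-- from collections import deque
--
-- n = 9
--
-- def bfs_reach(mat, i, j):
--     if i == 0 or i == n-1 or j == 0 or j == n-1:
--         return True
--
--     q = deque()
--     visited = [[False for _ in range(n)] for _ in range(n)]
--
--     q.append((i, j))
--     while q:
--         i, j = q.popleft()
--         neighbors = [(i - 1, j), (i + 1, j), (i, j - 1), (i, j + 1), (i-1, j-1), (i-1, j+1), (i+1, j-1), (i+1, j+1)]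
--         for ne in neighbors:
--             if ne[0] < 0 or ne[0] > n-1 or ne[1] < 0 or ne[1] > n-1:
--                 continue
--             if not visited[ne[0]][ne[1]] and not mat[ne[0]][ne[1]]:
--                 if ne[0] == 0 or ne[0] == n-1 or ne[1] == 0 or ne[1] == n-1:
--                     return True
--
--                 q.append(ne)
--                 visited[ne[0]][ne[1]] = True
--     return False
-- ===== SOURCE B (Python) =====
-- def bfs_reach(mat, i, j):
--     n = 9
--     if i == 0 or i == n - 1 or j == 0 or j == n - 1:
--         return True
--     visited = set()
--
--     def dfs(a, b):
--         for x, y in ((a - 1, b), (a + 1, b), (a, b - 1), (a, b + 1),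
--                      (a - 1, b - 1), (a - 1, b + 1), (a + 1, b - 1), (a + 1, b + 1)):
--             if 0 <= x < n and 0 <= y < n and (x, y) not in visited and not mat[x][y]:
--                 if x == 0 or x == n - 1 or y == 0 or y == n - 1:
--                     return True
--                 visited.add((x, y))
--                 if dfs(x, y):
--                     return True
--         return False
--
--     return dfs(i, j)
-- ===== Notes on version B (the rewrite author's own statement) =====
-- stated objective: alternative
-- what changed: Replaces the deque-based BFS worklist loop (queue + 9x9 visited matrix) with a recursive depth-first flood fill over a visited set; the border early-return, 8-neighbour order and neighbour-side border test are preserved.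
import Mathlib
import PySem

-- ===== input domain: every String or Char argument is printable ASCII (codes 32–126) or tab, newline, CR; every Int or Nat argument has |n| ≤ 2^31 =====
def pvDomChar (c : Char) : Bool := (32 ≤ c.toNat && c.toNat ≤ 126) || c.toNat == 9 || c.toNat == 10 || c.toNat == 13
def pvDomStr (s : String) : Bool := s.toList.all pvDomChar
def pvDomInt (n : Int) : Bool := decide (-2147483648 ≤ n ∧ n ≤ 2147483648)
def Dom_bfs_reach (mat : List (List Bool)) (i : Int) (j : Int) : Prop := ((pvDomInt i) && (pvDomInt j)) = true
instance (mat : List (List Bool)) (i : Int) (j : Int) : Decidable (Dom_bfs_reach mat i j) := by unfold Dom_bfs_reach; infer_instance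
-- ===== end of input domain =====

-- B replaces A's deque-based BFS worklist loop with a recursive depth-first flood fill
-- over a visited set (objective: alternative; same fixed 9×9 grid, same neighbour order,
-- same border tests, identical return value).

-- ===== PORT A =====
-- mat[x][y] : exact under Pre_ (both indices in range there; Python raises IndexError otherwise)
def pvCell (mat : List (List Bool)) (x y : Int) : Bool :=
  (PySem.List.pyGet? ((PySem.List.pyGet? mat x).getD []) y).getD false

-- the 8 neighbours, in A's (and B's) exact order
def pvNbrs (c : Int × Int) : List (Int × Int) :=
  [(c.1 - 1, c.2), (c.1 + 1, c.2), (c.1, c.2 - 1), (c.1, c.2 + 1),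
   (c.1 - 1, c.2 - 1), (c.1 - 1, c.2 + 1), (c.1 + 1, c.2 - 1), (c.1 + 1, c.2 + 1)]

-- the 81 grid cells (used only for the termination measure of the two loops)
def pvAll : List (Int × Int) :=
  (List.range 9).flatMap (fun x => (List.range 9).map (fun y => ((x : Int), (y : Int))))

def pvUnvis (vis : List (Int × Int)) : Nat :=
  (pvAll.filter (fun c => decide (c ∉ vis))).length

lemma pvAll_mem (c : Int × Int) :
    c ∈ pvAll ↔ (0 ≤ c.1 ∧ c.1 ≤ 8 ∧ 0 ≤ c.2 ∧ c.2 ≤ 8) := by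
  obtain ⟨a, b⟩ := c
  simp [pvAll, List.mem_flatMap, List.mem_map, Prod.ext_iff]
  constructor
  · rintro ⟨⟨x, hx, rfl⟩, ⟨y, hy, rfl⟩⟩
    omega
  · rintro ⟨h1, h2, h3, h4⟩
    exact ⟨⟨a.toNat, by omega, by omega⟩, ⟨b.toNat, by omega, by omega⟩⟩

lemma pvFilter_mono {α : Type} (l : List α) (p q : α → Bool) (h : ∀ x, p x = true → q x = true) :
    (l.filter p).length ≤ (l.filter q).length := by
  induction l with
  | nil => simp
  | cons a t ih =>
    by_cases hp : p a = true
    · simp [hp, h a hp]; omega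
    · simp only [List.filter_cons]
      cases hq : q a <;> simp [hp] <;> omega

lemma pvFilter_lt {c : Int × Int} {vis : List (Int × Int)} (l : List (Int × Int))
    (hc : c ∈ l) (hv : c ∉ vis) :
    (l.filter fun x => decide (x ∉ c :: vis)).length <
      (l.filter fun x => decide (x ∉ vis)).length := by
  induction l with
  | nil => simp at hc
  | cons a t ih =>
    have hmono := pvFilter_mono t (fun x => decide (x ∉ c :: vis)) (fun x => decide (x ∉ vis))
      (by intro x hx; simp at hx ⊢; tauto)
    rcases List.mem_cons.1 hc with rfl | hct
    · rw [List.filter_cons_of_neg (by simp), List.filter_cons_of_pos (by simp [hv])]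
      simp only [List.length_cons]
      omega
    · have hlt := ih hct
      by_cases hav : a ∈ vis
      · rw [List.filter_cons_of_neg (by simp [hav]), List.filter_cons_of_neg (by simp [hav])]
        exact hlt
      · by_cases hac : a = c
        · rw [List.filter_cons_of_neg (by simp [hac]), List.filter_cons_of_pos (by simp [hav])]
          simp only [List.length_cons]
          omega
        · rw [List.filter_cons_of_pos (by simp [hav, hac]),
              List.filter_cons_of_pos (by simp [hav])]
          simp only [List.length_cons]
          omega

lemma pvUnvis_lt {vis : List (Int × Int)} {c : Int × Int}
    (hc : c ∈ pvAll) (hv : c ∉ vis) : pvUnvis (c :: vis) < pvUnvis vis :=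
  pvFilter_lt pvAll hc hv

lemma pvUnvis_le {v1 v2 : List (Int × Int)} (h : ∀ x ∈ v1, x ∈ v2) :
    pvUnvis v2 ≤ pvUnvis v1 := by
  unfold pvUnvis
  apply pvFilter_mono
  intro x hx
  simp at hx ⊢
  intro hmem; exact hx (h x hmem)

-- the inner `for ne in neighbors` loop of A: returns none when A executes `return True`,
-- otherwise the queue and visited set after the scan
def pvScan (mat : List (List Bool)) :
    List (Int × Int) → List (Int × Int) → List (Int × Int) →
      Option (List (Int × Int) × List (Int × Int))
  | [], q, vis => some (q, vis)
  | ne :: rest, q, vis =>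
    if ne.1 < 0 ∨ 8 < ne.1 ∨ ne.2 < 0 ∨ 8 < ne.2 then
      pvScan mat rest q vis
    else if ne ∉ vis ∧ pvCell mat ne.1 ne.2 = false then
      if ne.1 = 0 ∨ ne.1 = 8 ∨ ne.2 = 0 ∨ ne.2 = 8 then none
      else pvScan mat rest (q ++ [ne]) (ne :: vis)
    else pvScan mat rest q vis

lemma pvScan_cons_eq (mat : List (List Bool)) (ne : Int × Int) (rest q vis : List (Int × Int)) :
    pvScan mat (ne :: rest) q vis =
      if ne.1 < 0 ∨ 8 < ne.1 ∨ ne.2 < 0 ∨ 8 < ne.2 then pvScan mat rest q vis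
      else if ne ∉ vis ∧ pvCell mat ne.1 ne.2 = false then
        if ne.1 = 0 ∨ ne.1 = 8 ∨ ne.2 = 0 ∨ ne.2 = 8 then none
        else pvScan mat rest (q ++ [ne]) (ne :: vis)
      else pvScan mat rest q vis := by
  simp only [pvScan]

lemma pvScan_nil_eq (mat : List (List Bool)) (q vis : List (Int × Int)) :
    pvScan mat [] q vis = some (q, vis) := by
  simp only [pvScan]

lemma pvScan_measure (mat : List (List Bool)) :
    ∀ (l q vis q' vis' : List (Int × Int)), pvScan mat l q vis = some (q', vis') →
      q'.length + 2 * pvUnvis vis' ≤ q.length + 2 * pvUnvis vis := by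
  intro l
  induction l with
  | nil =>
    intro q vis q' vis' h
    rw [pvScan_nil_eq] at h
    obtain ⟨rfl, rfl⟩ := by simpa using h
    omega
  | cons ne rest ih =>
    intro q vis q' vis' h
    rw [pvScan_cons_eq] at h
    by_cases h1 : ne.1 < 0 ∨ 8 < ne.1 ∨ ne.2 < 0 ∨ 8 < ne.2
    · rw [if_pos h1] at h
      exact ih _ _ _ _ h
    · rw [if_neg h1] at h
      by_cases h2 : ne ∉ vis ∧ pvCell mat ne.1 ne.2 = false
      · rw [if_pos h2] at h
        by_cases h3 : ne.1 = 0 ∨ ne.1 = 8 ∨ ne.2 = 0 ∨ ne.2 = 8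
        · rw [if_pos h3] at h
          exact absurd h (by simp)
        · rw [if_neg h3] at h
          have hq := ih _ _ _ _ h
          have hmem : ne ∈ pvAll := (pvAll_mem ne).2 (by omega)
          have hlt := pvUnvis_lt hmem h2.1
          simp only [List.length_append, List.length_cons, List.length_nil] at hq
          omega
      · rw [if_neg h2] at h
        exact ih _ _ _ _ h

-- the `while q` loop of A
def pvLoop (mat : List (List Bool)) : List (Int × Int) → List (Int × Int) → Bool
  | [], _ => false
  | c :: rest, vis =>
    match h : pvScan mat (pvNbrs c) rest vis with
    | none => true
    | some (q', vis') => pvLoop mat q' vis'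
termination_by q vis => q.length + 2 * pvUnvis vis
decreasing_by
  have := pvScan_measure mat (pvNbrs c) rest vis q' vis' h
  simp only [List.length_cons]
  omega

def bfs_reach (mat : List (List Bool)) (i : Int) (j : Int) : Bool :=
  if i = 0 ∨ i = 8 ∨ j = 0 ∨ j = 8 then true
  else pvLoop mat [(i, j)] []

-- ===== PORT B =====
-- B's recursive `dfs`: Python mutates one shared visited set, so the port threads it
-- through and returns it ({v // …} records that visited only grows — used for termination)
def pvDfs (mat : List (List Bool)) (vis : List (Int × Int)) :
    (l : List (Int × Int)) → Bool × {v : List (Int × Int) // ∀ x ∈ vis, x ∈ v}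
  | [] => (false, ⟨vis, fun _ h => h⟩)
  | ne :: rest =>
    if 0 ≤ ne.1 ∧ ne.1 ≤ 8 ∧ 0 ≤ ne.2 ∧ ne.2 ≤ 8 ∧ ne ∉ vis ∧ pvCell mat ne.1 ne.2 = false then
      if ne.1 = 0 ∨ ne.1 = 8 ∨ ne.2 = 0 ∨ ne.2 = 8 then
        (true, ⟨vis, fun _ h => h⟩)
      else
        match pvDfs mat (ne :: vis) (pvNbrs ne) with
        | (true, v) => (true, ⟨v.1, fun x hx => v.2 x (List.mem_cons_of_mem _ hx)⟩)
        | (false, v) =>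
          match pvDfs mat v.1 rest with
          | (b, w) => (b, ⟨w.1, fun x hx => w.2 x (v.2 x (List.mem_cons_of_mem _ hx))⟩)
    else pvDfs mat vis rest
termination_by l => 9 * pvUnvis vis + l.length
decreasing_by
  · have hmem : ne ∈ pvAll := (pvAll_mem ne).2 (by tauto)
    have hlt := pvUnvis_lt hmem (by tauto)
    have h8 : (pvNbrs ne).length = 8 := by simp [pvNbrs]
    simp only [h8, List.length_cons]
    omega
  · have hle : pvUnvis v.1 ≤ pvUnvis vis :=
      pvUnvis_le (fun x hx => v.2 x (List.mem_cons_of_mem _ hx))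
    simp only [List.length_cons]
    omega
  · simp only [List.length_cons]
    omega

def bfs_reach_alt (mat : List (List Bool)) (i : Int) (j : Int) : Bool :=
  if i = 0 ∨ i = 8 ∨ j = 0 ∨ j = 8 then true
  else (pvDfs mat [] (pvNbrs (i, j))).1

-- ===== PRECONDITION & SPEC =====
-- Pre_ excludes inputs on which the 9×9 search can index a matrix that is not 9×9 (IndexError
-- in Python); it keeps every border start and every out-of-reach start, on which A returns
-- without indexing. (It also excludes a few non-9×9 inputs on which A happens to return
-- because the search never reaches a short row — see the cite in claim.json.)
def Pre_bfs_reach (mat : List (List Bool)) (i : Int) (j : Int) : Prop :=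
  (i = 0 ∨ i = 8 ∨ j = 0 ∨ j = 8) ∨
  (i < -1 ∨ 9 < i ∨ j < -1 ∨ 9 < j) ∨
  (mat.length = 9 ∧ ∀ r ∈ mat, r.length = 9)
instance (mat : List (List Bool)) (i : Int) (j : Int) : Decidable (Pre_bfs_reach mat i j) := by
  unfold Pre_bfs_reach; infer_instance

def pvWitness_bfs_reach : List (List Bool) × Int × Int :=
  (List.replicate 9 (List.replicate 9 false), 4, 4)

def Spec_bfs_reach (mat : List (List Bool)) (i : Int) (j : Int) (out : Bool) : Prop := out = bfs_reach_alt mat i j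
instance (mat : List (List Bool)) (i : Int) (j : Int) (out : Bool) : Decidable (Spec_bfs_reach mat i j out) := by unfold Spec_bfs_reach; infer_instance

-- ===== CLAIM (what is proved, stated in full; the proofs are below) =====
def Claim_equal_bfs_reach : Prop := ∀ (mat : List (List Bool)) (i : Int) (j : Int), Dom_bfs_reach mat i j → Pre_bfs_reach mat i j → Spec_bfs_reach mat i j (bfs_reach mat i j)

-- ===== LEMMAS AND PROOFS =====

def pvInb (c : Int × Int) : Prop := 0 ≤ c.1 ∧ c.1 ≤ 8 ∧ 0 ≤ c.2 ∧ c.2 ≤ 8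
def pvBorder (c : Int × Int) : Prop := c.1 = 0 ∨ c.1 = 8 ∨ c.2 = 0 ∨ c.2 = 8
def pvOpen (mat : List (List Bool)) (c : Int × Int) : Prop := pvCell mat c.1 c.2 = false

-- one admissible interior move of the search
def pvStep (mat : List (List Bool)) (c z : Int × Int) : Prop :=
  z ∈ pvNbrs c ∧ pvInb z ∧ pvOpen mat z ∧ ¬ pvBorder z

-- c has an in-range unblocked border neighbour (the condition on which both programs return True)
def pvEsc (mat : List (List Bool)) (c : Int × Int) : Prop :=
  ∃ z ∈ pvNbrs c, pvInb z ∧ pvOpen mat z ∧ pvBorder z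

-- "from c there is an escape path whose interior cells avoid vis"
inductive pvAP (mat : List (List Bool)) (vis : List (Int × Int)) : Int × Int → Prop
  | esc {c : Int × Int} : pvEsc mat c → pvAP mat vis c
  | step {c z : Int × Int} : pvStep mat c z → z ∉ vis → pvAP mat vis z → pvAP mat vis c

lemma pvAP_mono {mat : List (List Bool)} {vis vis' : List (Int × Int)} {c : Int × Int}
    (h : pvAP mat vis c) (hsub : ∀ x ∈ vis, x ∈ vis') :
    pvAP mat vis' c ∨ ∃ z, z ∈ vis' ∧ z ∉ vis ∧ pvAP mat vis' z := by
  induction h with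
  | esc he => exact Or.inl (pvAP.esc he)
  | @step c z hs hz _ ih =>
    rcases ih with hap | ⟨w, hw1, hw2, hw3⟩
    · by_cases hz' : z ∈ vis'
      · exact Or.inr ⟨z, hz', hz, hap⟩
      · exact Or.inl (pvAP.step hs hz' hap)
    · exact Or.inr ⟨w, hw1, hw2, hw3⟩

-- pvScan facts -----------------------------------------------------------

lemma pvScan_mono (mat : List (List Bool)) :
    ∀ (l q vis q' vis' : List (Int × Int)), pvScan mat l q vis = some (q', vis') →
      (∀ x ∈ q, x ∈ q') ∧ (∀ x ∈ vis, x ∈ vis') := by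
  intro l
  induction l with
  | nil =>
    intro q vis q' vis' h
    rw [pvScan_nil_eq] at h
    obtain ⟨rfl, rfl⟩ := by simpa using h
    exact ⟨fun x hx => hx, fun x hx => hx⟩
  | cons ne rest ih =>
    intro q vis q' vis' h
    rw [pvScan_cons_eq] at h
    by_cases h1 : ne.1 < 0 ∨ 8 < ne.1 ∨ ne.2 < 0 ∨ 8 < ne.2
    · rw [if_pos h1] at h
      exact ih _ _ _ _ h
    · rw [if_neg h1] at h
      by_cases h2 : ne ∉ vis ∧ pvCell mat ne.1 ne.2 = false
      · rw [if_pos h2] at h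
        by_cases h3 : ne.1 = 0 ∨ ne.1 = 8 ∨ ne.2 = 0 ∨ ne.2 = 8
        · rw [if_pos h3] at h
          exact absurd h (by simp)
        · rw [if_neg h3] at h
          obtain ⟨hq, hv⟩ := ih _ _ _ _ h
          exact ⟨fun x hx => hq x (by simp [hx]),
                 fun x hx => hv x (List.mem_cons_of_mem _ hx)⟩
      · rw [if_neg h2] at h
        exact ih _ _ _ _ h

lemma pvScan_q_new (mat : List (List Bool)) :
    ∀ (l q vis q' vis' : List (Int × Int)), pvScan mat l q vis = some (q', vis') →
      ∀ x ∈ q', x ∈ q ∨ (x ∈ l ∧ pvInb x ∧ pvOpen mat x ∧ ¬ pvBorder x) := by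
  intro l
  induction l with
  | nil =>
    intro q vis q' vis' h
    rw [pvScan_nil_eq] at h
    obtain ⟨rfl, rfl⟩ := by simpa using h
    exact fun x hx => Or.inl hx
  | cons ne rest ih =>
    intro q vis q' vis' h
    rw [pvScan_cons_eq] at h
    by_cases h1 : ne.1 < 0 ∨ 8 < ne.1 ∨ ne.2 < 0 ∨ 8 < ne.2
    · rw [if_pos h1] at h
      intro x hx
      rcases ih _ _ _ _ h x hx with hxq | ⟨hl, hrest⟩
      · exact Or.inl hxq
      · exact Or.inr ⟨List.mem_cons_of_mem _ hl, hrest⟩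
    · rw [if_neg h1] at h
      by_cases h2 : ne ∉ vis ∧ pvCell mat ne.1 ne.2 = false
      · rw [if_pos h2] at h
        by_cases h3 : ne.1 = 0 ∨ ne.1 = 8 ∨ ne.2 = 0 ∨ ne.2 = 8
        · rw [if_pos h3] at h
          exact absurd h (by simp)
        · rw [if_neg h3] at h
          intro x hx
          rcases ih _ _ _ _ h x hx with hxq | ⟨hl, hrest⟩
          · rcases List.mem_append.1 hxq with hxq | hxe
            · exact Or.inl hxq
            · have hxne : x = ne := by simpa using hxe
              subst hxne
              exact Or.inr ⟨List.mem_cons_self .., by unfold pvInb; omega, h2.2,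
                            by unfold pvBorder; tauto⟩
          · exact Or.inr ⟨List.mem_cons_of_mem _ hl, hrest⟩
      · rw [if_neg h2] at h
        intro x hx
        rcases ih _ _ _ _ h x hx with hxq | ⟨hl, hrest⟩
        · exact Or.inl hxq
        · exact Or.inr ⟨List.mem_cons_of_mem _ hl, hrest⟩

lemma pvScan_vis_new (mat : List (List Bool)) :
    ∀ (l q vis q' vis' : List (Int × Int)), pvScan mat l q vis = some (q', vis') →
      ∀ v ∈ vis', v ∈ vis ∨ (v ∈ q' ∧ ¬ pvBorder v) := by
  intro l
  induction l with
  | nil =>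
    intro q vis q' vis' h
    rw [pvScan_nil_eq] at h
    obtain ⟨rfl, rfl⟩ := by simpa using h
    exact fun v hv => Or.inl hv
  | cons ne rest ih =>
    intro q vis q' vis' h
    rw [pvScan_cons_eq] at h
    by_cases h1 : ne.1 < 0 ∨ 8 < ne.1 ∨ ne.2 < 0 ∨ 8 < ne.2
    · rw [if_pos h1] at h
      exact ih _ _ _ _ h
    · rw [if_neg h1] at h
      by_cases h2 : ne ∉ vis ∧ pvCell mat ne.1 ne.2 = false
      · rw [if_pos h2] at h
        by_cases h3 : ne.1 = 0 ∨ ne.1 = 8 ∨ ne.2 = 0 ∨ ne.2 = 8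
        · rw [if_pos h3] at h
          exact absurd h (by simp)
        · rw [if_neg h3] at h
          intro v hv
          rcases ih _ _ _ _ h v hv with hvv | hnew
          · rcases List.mem_cons.1 hvv with rfl | hvv
            · have hq : v ∈ q' := (pvScan_mono mat _ _ _ _ _ h).1 v (by simp)
              exact Or.inr ⟨hq, by unfold pvBorder; tauto⟩
            · exact Or.inl hvv
          · exact Or.inr hnew
      · rw [if_neg h2] at h
        exact ih _ _ _ _ h

lemma pvScan_step_vis (mat : List (List Bool)) :
    ∀ (l q vis q' vis' : List (Int × Int)), pvScan mat l q vis = some (q', vis') →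
      ∀ ne ∈ l, pvInb ne → pvOpen mat ne → ¬ pvBorder ne → ne ∈ vis' := by
  intro l
  induction l with
  | nil => simp
  | cons ne rest ih =>
    intro q vis q' vis' h x hx hinb hopen hnb
    rw [pvScan_cons_eq] at h
    unfold pvInb at hinb
    unfold pvBorder at hnb
    unfold pvOpen at hopen
    by_cases h1 : ne.1 < 0 ∨ 8 < ne.1 ∨ ne.2 < 0 ∨ 8 < ne.2
    · rw [if_pos h1] at h
      rcases List.mem_cons.1 hx with rfl | hxr
      · omega
      · exact ih _ _ _ _ h x hxr (by unfold pvInb; omega) (by unfold pvOpen; exact hopen)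
          (by unfold pvBorder; tauto)
    · rw [if_neg h1] at h
      by_cases h2 : ne ∉ vis ∧ pvCell mat ne.1 ne.2 = false
      · rw [if_pos h2] at h
        by_cases h3 : ne.1 = 0 ∨ ne.1 = 8 ∨ ne.2 = 0 ∨ ne.2 = 8
        · rw [if_pos h3] at h
          exact absurd h (by simp)
        · rw [if_neg h3] at h
          rcases List.mem_cons.1 hx with rfl | hxr
          · exact (pvScan_mono mat _ _ _ _ _ h).2 x (List.mem_cons_self ..)
          · exact ih _ _ _ _ h x hxr (by unfold pvInb; omega) (by unfold pvOpen; exact hopen)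
              (by unfold pvBorder; tauto)
      · rw [if_neg h2] at h
        rcases List.mem_cons.1 hx with rfl | hxr
        · push_neg at h2
          have hxv : x ∈ vis := by
            by_contra hxv
            exact absurd (h2 hxv) (by simpa using hopen)
          exact (pvScan_mono mat _ _ _ _ _ h).2 x hxv
        · exact ih _ _ _ _ h x hxr (by unfold pvInb; omega) (by unfold pvOpen; exact hopen)
            (by unfold pvBorder; tauto)

lemma pvScan_esc_vis (mat : List (List Bool)) :
    ∀ (l q vis q' vis' : List (Int × Int)), pvScan mat l q vis = some (q', vis') →
      ∀ ne ∈ l, pvInb ne → pvOpen mat ne → pvBorder ne → ne ∈ vis := by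
  intro l
  induction l with
  | nil => simp
  | cons ne rest ih =>
    intro q vis q' vis' h x hx hinb hopen hb
    rw [pvScan_cons_eq] at h
    by_cases h1 : ne.1 < 0 ∨ 8 < ne.1 ∨ ne.2 < 0 ∨ 8 < ne.2
    · rw [if_pos h1] at h
      rcases List.mem_cons.1 hx with rfl | hxr
      · unfold pvInb at hinb; omega
      · exact ih _ _ _ _ h x hxr hinb hopen hb
    · rw [if_neg h1] at h
      by_cases h2 : ne ∉ vis ∧ pvCell mat ne.1 ne.2 = false
      · rw [if_pos h2] at h
        by_cases h3 : ne.1 = 0 ∨ ne.1 = 8 ∨ ne.2 = 0 ∨ ne.2 = 8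
        · rw [if_pos h3] at h
          exact absurd h (by simp)
        · rw [if_neg h3] at h
          rcases List.mem_cons.1 hx with rfl | hxr
          · exact absurd h3 (by unfold pvBorder at hb; tauto)
          · have hmem := ih _ _ _ _ h x hxr hinb hopen hb
            rcases List.mem_cons.1 hmem with rfl | hmem
            · exact absurd h3 (by unfold pvBorder at hb; tauto)
            · exact hmem
      · rw [if_neg h2] at h
        rcases List.mem_cons.1 hx with rfl | hxr
        · push_neg at h2
          by_contra hxv
          exact absurd (h2 hxv) (by simpa [pvOpen] using hopen)
        · exact ih _ _ _ _ h x hxr hinb hopen hb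

lemma pvScan_none_esc (mat : List (List Bool)) :
    ∀ (l q vis : List (Int × Int)), pvScan mat l q vis = none →
      ∃ ne ∈ l, pvInb ne ∧ pvOpen mat ne ∧ pvBorder ne := by
  intro l
  induction l with
  | nil => intro q vis h; rw [pvScan_nil_eq] at h; exact absurd h (by simp)
  | cons ne rest ih =>
    intro q vis h
    rw [pvScan_cons_eq] at h
    by_cases h1 : ne.1 < 0 ∨ 8 < ne.1 ∨ ne.2 < 0 ∨ 8 < ne.2
    · rw [if_pos h1] at h
      obtain ⟨x, hx, hrest⟩ := ih _ _ h
      exact ⟨x, List.mem_cons_of_mem _ hx, hrest⟩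
    · rw [if_neg h1] at h
      by_cases h2 : ne ∉ vis ∧ pvCell mat ne.1 ne.2 = false
      · rw [if_pos h2] at h
        by_cases h3 : ne.1 = 0 ∨ ne.1 = 8 ∨ ne.2 = 0 ∨ ne.2 = 8
        · exact ⟨ne, List.mem_cons_self .., by unfold pvInb; omega, h2.2, h3⟩
        · rw [if_neg h3] at h
          obtain ⟨x, hx, hrest⟩ := ih _ _ h
          exact ⟨x, List.mem_cons_of_mem _ hx, hrest⟩
      · rw [if_neg h2] at h
        obtain ⟨x, hx, hrest⟩ := ih _ _ h
        exact ⟨x, List.mem_cons_of_mem _ hx, hrest⟩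

-- BFS (port A) characterisation -------------------------------------------

lemma pvLoop_sound (mat : List (List Bool)) (s : Int × Int) :
    ∀ (q vis : List (Int × Int)), pvLoop mat q vis = true →
      (∀ c ∈ q, pvAP mat [] c → pvAP mat [] s) → pvAP mat [] s := by
  intro q vis h hq
  induction q, vis using pvLoop.induct mat with
  | case1 => simp [pvLoop] at h
  | case2 c rest vis hscan =>
    obtain ⟨ne, hne, hinb, hopen, hb⟩ := pvScan_none_esc mat _ _ _ hscan
    exact hq c (List.mem_cons_self ..) (pvAP.esc ⟨ne, hne, hinb, hopen, hb⟩)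
  | case3 c rest vis q' vis' hscan ih =>
    rw [pvLoop, hscan] at h
    refine ih h ?_
    intro x hx hap
    rcases pvScan_q_new mat _ _ _ _ _ hscan x hx with hxr | ⟨hl, hinb, hopen, hnb⟩
    · exact hq x (List.mem_cons_of_mem _ hxr) hap
    · exact hq c (List.mem_cons_self ..) (pvAP.step ⟨hl, hinb, hopen, hnb⟩ (by simp) hap)

lemma pvLoop_complete (mat : List (List Bool)) :
    ∀ (q vis : List (Int × Int)), pvLoop mat q vis = false →
      (∀ v ∈ vis, ¬ pvBorder v) → ∀ c0 ∈ q, ¬ pvAP mat vis c0 := by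
  intro q vis h hnb
  induction q, vis using pvLoop.induct mat with
  | case1 => simp
  | case2 c rest vis hscan => rw [pvLoop, hscan] at h; exact absurd h (by simp)
  | case3 c rest vis q' vis' hscan ih =>
    rw [pvLoop, hscan] at h
    have hnb' : ∀ v ∈ vis', ¬ pvBorder v := by
      intro v hv
      rcases pvScan_vis_new mat _ _ _ _ _ hscan v hv with hvv | ⟨_, hb⟩
      · exact hnb v hvv
      · exact hb
    have ihq := ih h hnb'
    intro c0 hc0 hap
    have hsub := (pvScan_mono mat _ _ _ _ _ hscan).2
    rcases pvAP_mono hap hsub with hap' | ⟨z, hz1, hz2, hz3⟩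
    · rcases List.mem_cons.1 hc0 with rfl | hc0r
      · cases hap' with
        | esc he =>
          obtain ⟨ne, hne, hinb, hopen, hb⟩ := he
          exact hnb ne (pvScan_esc_vis mat _ _ _ _ _ hscan ne hne hinb hopen hb) hb
        | step hs hz hap2 =>
          obtain ⟨hmem, hinb, hopen, hnbz⟩ := hs
          exact hz (pvScan_step_vis mat _ _ _ _ _ hscan _ hmem hinb hopen hnbz)
      · exact ihq c0 ((pvScan_mono mat _ _ _ _ _ hscan).1 c0 hc0r) hap'
    · rcases pvScan_vis_new mat _ _ _ _ _ hscan z hz1 with hzv | ⟨hzq, _⟩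
      · exact hz2 hzv
      · exact ihq z hzq hz3

lemma pvLoop_iff (mat : List (List Bool)) (s : Int × Int) :
    pvLoop mat [s] [] = true ↔ pvAP mat [] s := by
  constructor
  · intro h
    exact pvLoop_sound mat s [s] [] h (by intro c hc; simp at hc; subst hc; exact id)
  · intro hap
    by_contra h
    have hf : pvLoop mat [s] [] = false := by simpa using h
    exact pvLoop_complete mat [s] [] hf (by simp) s (by simp) hap

-- DFS (port B) characterisation -------------------------------------------

lemma pvDfs_nil_eq (mat : List (List Bool)) (vis : List (Int × Int)) :
    (pvDfs mat vis []).1 = false ∧ (pvDfs mat vis []).2.1 = vis := by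
  rw [pvDfs]
  exact ⟨rfl, rfl⟩

lemma pvDfs_skip_eq (mat : List (List Bool)) (vis : List (Int × Int)) (ne : Int × Int)
    (rest : List (Int × Int))
    (hg : ¬ (0 ≤ ne.1 ∧ ne.1 ≤ 8 ∧ 0 ≤ ne.2 ∧ ne.2 ≤ 8 ∧ ne ∉ vis ∧ pvCell mat ne.1 ne.2 = false)) :
    pvDfs mat vis (ne :: rest) = pvDfs mat vis rest := by
  rw [pvDfs, if_neg hg]

lemma pvDfs_border_eq (mat : List (List Bool)) (vis : List (Int × Int)) (ne : Int × Int)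
    (rest : List (Int × Int))
    (hg : 0 ≤ ne.1 ∧ ne.1 ≤ 8 ∧ 0 ≤ ne.2 ∧ ne.2 ≤ 8 ∧ ne ∉ vis ∧ pvCell mat ne.1 ne.2 = false)
    (hb : ne.1 = 0 ∨ ne.1 = 8 ∨ ne.2 = 0 ∨ ne.2 = 8) :
    (pvDfs mat vis (ne :: rest)).1 = true := by
  rw [pvDfs, if_pos hg, if_pos hb]

lemma pvDfs_inner_true_eq (mat : List (List Bool)) (vis : List (Int × Int)) (ne : Int × Int)
    (rest : List (Int × Int)) (v : {v : List (Int × Int) // ∀ x ∈ ne :: vis, x ∈ v})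
    (hg : 0 ≤ ne.1 ∧ ne.1 ≤ 8 ∧ 0 ≤ ne.2 ∧ ne.2 ≤ 8 ∧ ne ∉ vis ∧ pvCell mat ne.1 ne.2 = false)
    (hb : ¬ (ne.1 = 0 ∨ ne.1 = 8 ∨ ne.2 = 0 ∨ ne.2 = 8))
    (hv : pvDfs mat (ne :: vis) (pvNbrs ne) = (true, v)) :
    (pvDfs mat vis (ne :: rest)).1 = true := by
  rw [pvDfs, if_pos hg, if_neg hb, hv]

lemma pvDfs_inner_false_eq (mat : List (List Bool)) (vis : List (Int × Int)) (ne : Int × Int)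
    (rest : List (Int × Int)) (v : {v : List (Int × Int) // ∀ x ∈ ne :: vis, x ∈ v})
    (hg : 0 ≤ ne.1 ∧ ne.1 ≤ 8 ∧ 0 ≤ ne.2 ∧ ne.2 ≤ 8 ∧ ne ∉ vis ∧ pvCell mat ne.1 ne.2 = false)
    (hb : ¬ (ne.1 = 0 ∨ ne.1 = 8 ∨ ne.2 = 0 ∨ ne.2 = 8))
    (hv : pvDfs mat (ne :: vis) (pvNbrs ne) = (false, v)) :
    (pvDfs mat vis (ne :: rest)).1 = (pvDfs mat v.1 rest).1 ∧
    (pvDfs mat vis (ne :: rest)).2.1 = (pvDfs mat v.1 rest).2.1 := by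
  rw [pvDfs, if_pos hg, if_neg hb, hv]
  rcases hr : pvDfs mat v.1 rest with ⟨b2, w⟩
  simp [hr]

lemma pvDfs_sound (mat : List (List Bool)) :
    ∀ (vis l : List (Int × Int)), (pvDfs mat vis l).1 = true →
      ∃ ne ∈ l, pvInb ne ∧ pvOpen mat ne ∧ (pvBorder ne ∨ pvAP mat [] ne) := by
  intro vis l
  induction vis, l using pvDfs.induct mat with
  | case1 vis =>
    intro h
    exact absurd h (by simp [(pvDfs_nil_eq mat vis).1])
  | case2 vis ne rest hg hb =>
    intro _
    exact ⟨ne, List.mem_cons_self .., by unfold pvInb; tauto, hg.2.2.2.2.2, Or.inl hb⟩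
  | case3 vis ne rest hg hb v hv ih =>
    intro _
    obtain ⟨ne2, hne2, hinb2, hopen2, hd⟩ := ih (by rw [hv])
    have hap : pvAP mat [] ne := by
      by_cases hb2 : pvBorder ne2
      · exact pvAP.esc ⟨ne2, hne2, hinb2, hopen2, hb2⟩
      · rcases hd with hb2' | hap2
        · exact absurd hb2' hb2
        · exact pvAP.step ⟨hne2, hinb2, hopen2, hb2⟩ (by simp) hap2
    exact ⟨ne, List.mem_cons_self .., by unfold pvInb; tauto, hg.2.2.2.2.2, Or.inr hap⟩
  | case4 vis ne rest hg hb v hv b w hw ih1 ih2 =>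
    intro h
    rw [(pvDfs_inner_false_eq mat vis ne rest v hg hb hv).1] at h
    obtain ⟨x, hx, hrest⟩ := ih2 h
    exact ⟨x, List.mem_cons_of_mem _ hx, hrest⟩
  | case5 vis ne rest hg ih =>
    intro h
    rw [pvDfs_skip_eq mat vis ne rest hg] at h
    obtain ⟨x, hx, hrest⟩ := ih h
    exact ⟨x, List.mem_cons_of_mem _ hx, hrest⟩

lemma pvDfs_closed (mat : List (List Bool)) :
    ∀ (vis l : List (Int × Int)), (pvDfs mat vis l).1 = false →
      (∀ v ∈ vis, ¬ pvBorder v) →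
      (∀ v ∈ (pvDfs mat vis l).2.1, ¬ pvBorder v) ∧
      (∀ x ∈ (pvDfs mat vis l).2.1, x ∉ vis →
        (¬ pvEsc mat x ∧ ∀ z, pvStep mat x z → z ∈ (pvDfs mat vis l).2.1)) ∧
      (∀ ne ∈ l, pvInb ne → pvOpen mat ne → ¬ pvBorder ne ∧ ne ∈ (pvDfs mat vis l).2.1) := by
  intro vis l
  induction vis, l using pvDfs.induct mat with
  | case1 vis =>
    intro _ hnb
    rw [(pvDfs_nil_eq mat vis).2]
    refine ⟨hnb, ?_, by simp⟩
    intro x hx hxv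
    exact absurd hx hxv
  | case2 vis ne rest hg hb =>
    intro h _
    rw [pvDfs_border_eq mat vis ne rest hg hb] at h
    exact absurd h (by simp)
  | case3 vis ne rest hg hb v hv ih =>
    intro h _
    rw [pvDfs_inner_true_eq mat vis ne rest v hg hb hv] at h
    exact absurd h (by simp)
  | case4 vis ne rest hg hb v hv b w hw ih1 ih2 =>
    intro h hnb
    obtain ⟨hfst, hsnd⟩ := pvDfs_inner_false_eq mat vis ne rest v hg hb hv
    rw [hfst] at h
    have hne_nb : ¬ pvBorder ne := by unfold pvBorder; tauto
    have hnb1 : ∀ x ∈ (ne :: vis), ¬ pvBorder x := by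
      intro x hx
      rcases List.mem_cons.1 hx with rfl | hx
      · exact hne_nb
      · exact hnb x hx
    have hinner := ih1 (by rw [hv]) hnb1
    rw [hv] at hinner
    simp only at hinner
    have houter := ih2 h (by intro x hx; exact hinner.1 x hx)
    have hsub_outer : ∀ x ∈ v.1, x ∈ (pvDfs mat v.1 rest).2.1 := (pvDfs mat v.1 rest).2.2
    rw [hsnd]
    refine ⟨houter.1, ?_, ?_⟩
    · intro x hx hxvis
      by_cases hxv1 : x ∈ v.1
      · by_cases hxnv : x ∈ (ne :: vis)
        · have hx_ne : x = ne := by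
            rcases List.mem_cons.1 hxnv with rfl | hxnv
            · rfl
            · exact absurd hxnv hxvis
          subst hx_ne
          constructor
          · rintro ⟨z, hz, hinbz, hopenz, hbz⟩
            exact absurd hbz (hinner.2.2 z hz hinbz hopenz).1
          · rintro z ⟨hzmem, hzinb, hzopen, hznb⟩
            exact hsub_outer z (hinner.2.2 z hzmem hzinb hzopen).2
        · have hxcl := hinner.2.1 x hxv1 hxnv
          exact ⟨hxcl.1, fun z hz => hsub_outer z (hxcl.2 z hz)⟩
      · exact houter.2.1 x hx hxv1
    · intro x hx hinb hopen
      rcases List.mem_cons.1 hx with rfl | hxr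
      · exact ⟨hne_nb, hsub_outer x (v.2 x (List.mem_cons_self ..))⟩
      · exact houter.2.2 x hxr hinb hopen
  | case5 vis ne rest hg ih =>
    intro h hnb
    rw [pvDfs_skip_eq mat vis ne rest hg] at h ⊢
    have hrest := ih h hnb
    refine ⟨hrest.1, hrest.2.1, ?_⟩
    intro x hx hinb hopen
    rcases List.mem_cons.1 hx with rfl | hxr
    · have hxvis : x ∈ vis := by
        by_contra hxvis
        unfold pvInb at hinb
        unfold pvOpen at hopen
        exact hg ⟨hinb.1, hinb.2.1, hinb.2.2.1, hinb.2.2.2, hxvis, hopen⟩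
      exact ⟨hnb x hxvis, (pvDfs mat vis rest).2.2 x hxvis⟩
    · exact hrest.2.2 x hxr hinb hopen

lemma pvClosed_no_ap (mat : List (List Bool)) (S : List (Int × Int))
    (hS : ∀ x ∈ S, ¬ pvEsc mat x ∧ ∀ z, pvStep mat x z → z ∈ S) :
    ∀ c, pvAP mat [] c → c ∈ S → False := by
  intro c hap
  induction hap with
  | esc he => intro hc; exact (hS _ hc).1 he
  | step hs _ _ ih => intro hc; exact ih ((hS _ hc).2 _ hs)

lemma pvDfs_iff (mat : List (List Bool)) (s : Int × Int) :
    (pvDfs mat [] (pvNbrs s)).1 = true ↔ pvAP mat [] s := by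
  constructor
  · intro h
    obtain ⟨ne, hne, hinb, hopen, hd⟩ := pvDfs_sound mat [] (pvNbrs s) h
    by_cases hb : pvBorder ne
    · exact pvAP.esc ⟨ne, hne, hinb, hopen, hb⟩
    · rcases hd with hb' | hap
      · exact absurd hb' hb
      · exact pvAP.step ⟨hne, hinb, hopen, hb⟩ (by simp) hap
  · intro hap
    by_contra h
    have hf : (pvDfs mat [] (pvNbrs s)).1 = false := by simpa using h
    obtain ⟨_, hclosed, hnbrs⟩ := pvDfs_closed mat [] (pvNbrs s) hf (by simp)
    have hS : ∀ x ∈ (pvDfs mat [] (pvNbrs s)).2.1,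
        ¬ pvEsc mat x ∧ ∀ z, pvStep mat x z → z ∈ (pvDfs mat [] (pvNbrs s)).2.1 := by
      intro x hx
      exact hclosed x hx (by simp)
    cases hap with
    | esc he =>
      obtain ⟨ne, hne, hinb, hopen, hb⟩ := he
      exact absurd hb (hnbrs ne hne hinb hopen).1
    | step hs _ hap2 =>
      obtain ⟨hmem, hinb, hopen, hnbz⟩ := hs
      exact pvClosed_no_ap mat _ hS _ hap2 (hnbrs _ hmem hinb hopen).2

-- ===== VERDICT (by name: the statement is the Claim_ definition above) =====
theorem bfs_reach_spec : Claim_equal_bfs_reach := by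
  intro mat i j _ _
  unfold Spec_bfs_reach bfs_reach bfs_reach_alt
  by_cases hb : i = 0 ∨ i = 8 ∨ j = 0 ∨ j = 8
  · simp [hb]
  · simp only [hb, if_false]
    have h1 := pvLoop_iff mat (i, j)
    have h2 := pvDfs_iff mat (i, j)
    cases hA : pvLoop mat [(i, j)] [] <;> cases hB : (pvDfs mat [] (pvNbrs (i, j))).1 <;>
      simp_all
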